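-- pv_equiv track=rewrite | github.com/PedroLauand/EvansScenario | Indices.py | evansCmarginalA4
-- ===== SOURCE A (Python) =====
-- def evansCmarginalA4(c0,c1):
--     #Index for marginal joint distribution q(c0,c1) for evans scenario where |C|=2.
--     i=0
--     for C1 in range(2):
--         for C0 in range(2):
--             if C1==c1 and C0==c0:
--                 return i
--             else :
--                 i=i+1
-- ===== SOURCE B (Python) =====
-- _TABLE = {(0, 0): 0, (1, 0): 1, (0, 1): 2, (1, 1): 3}
--
-- def evansCmarginalA4(c0, c1):
--     return _TABLE.get((c0, c1))
-- ===== Notes on version B (the rewrite author's own statement) =====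
-- stated objective: simpler
-- what changed: Replaces the nested counting loops with a single precomputed 4-entry dict mapping each (c0,c1) pair to its enumeration index, returned via dict.get so unmatched inputs yield None.
import Mathlib
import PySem

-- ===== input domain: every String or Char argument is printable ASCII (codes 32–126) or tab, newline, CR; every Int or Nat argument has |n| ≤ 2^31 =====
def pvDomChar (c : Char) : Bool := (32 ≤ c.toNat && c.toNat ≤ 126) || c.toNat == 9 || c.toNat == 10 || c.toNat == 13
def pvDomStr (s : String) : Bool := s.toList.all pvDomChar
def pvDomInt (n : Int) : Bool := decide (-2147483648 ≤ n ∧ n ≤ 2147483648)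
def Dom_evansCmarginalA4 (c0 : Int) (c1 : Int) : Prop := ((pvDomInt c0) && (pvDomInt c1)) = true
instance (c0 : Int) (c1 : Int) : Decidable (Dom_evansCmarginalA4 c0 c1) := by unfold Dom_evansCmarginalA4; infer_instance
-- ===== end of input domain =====

-- B replaces A's nested counting loops with a precomputed 4-entry dict lookup (simpler).


-- ===== PORT A =====
-- inner 'for C0 in range(2)': returns (some index) on hit, else (none, updated counter)
def evansA4Inner (c0 : Int) (c1 : Int) (C1v : Int) : List Int → Int → Option Int × Int
  | [], i => (none, i)
  | C0 :: rest, i =>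
    if C1v == c1 && C0 == c0 then (some i, i)
    else evansA4Inner c0 c1 C1v rest (i + 1)

-- outer 'for C1 in range(2)'; falls through to None like the Python
def evansA4Outer (c0 : Int) (c1 : Int) : List Int → Int → Option Int
  | [], _ => none
  | C1 :: rest, i =>
    match evansA4Inner c0 c1 C1 (PySem.List.pyRange 0 2 1) i with
    | (some r, _) => some r
    | (none, i') => evansA4Outer c0 c1 rest i'

def evansCmarginalA4 (c0 : Int) (c1 : Int) : Option Int :=
  evansA4Outer c0 c1 (PySem.List.pyRange 0 2 1) 0

-- ===== PORT B =====
-- B: precomputed table {(0,0):0,(1,0):1,(0,1):2,(1,1):3}, looked up with dict.get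
def evansA4Table : PySem.Dict (Int × Int) Int :=
  PySem.Dict.ofList [((0, 0), 0), ((1, 0), 1), ((0, 1), 2), ((1, 1), 3)]

def evansCmarginalA4_alt (c0 : Int) (c1 : Int) : Option Int :=
  evansA4Table.get? (c0, c1)

-- ===== PRECONDITION & SPEC =====
def Spec_evansCmarginalA4 (c0 : Int) (c1 : Int) (out : Option Int) : Prop := out = evansCmarginalA4_alt c0 c1
instance (c0 : Int) (c1 : Int) (out : Option Int) : Decidable (Spec_evansCmarginalA4 c0 c1 out) := by unfold Spec_evansCmarginalA4; infer_instance

-- ===== CLAIM (what is proved, stated in full; the proofs are below) =====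
def Claim_equal_evansCmarginalA4 : Prop := ∀ (c0 : Int) (c1 : Int), Dom_evansCmarginalA4 c0 c1 → Spec_evansCmarginalA4 c0 c1 (evansCmarginalA4 c0 c1)

-- ===== LEMMAS AND PROOFS =====

-- ===== VERDICT (by name: the statement is the Claim_ definition above) =====
theorem evansCmarginalA4_spec : Claim_equal_evansCmarginalA4 := by
  intro c0 c1 _
  unfold Spec_evansCmarginalA4
  by_cases h0 : c0 = 0 <;> by_cases h0' : c0 = 1 <;>
    by_cases h1 : c1 = 0 <;> by_cases h1' : c1 = 1 <;>
    subst_vars <;>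
    first
    | decide
    | (simp [evansCmarginalA4, evansCmarginalA4_alt, evansA4Outer, evansA4Inner,
        evansA4Table, PySem.Dict.ofList, PySem.Dict.get?, PySem.Dict.update,
        PySem.Dict.empty, PySem.Dict.insert, PySem.List.pyRange, List.range,
        List.range.loop, List.find?, beq_iff_eq]
       split_ifs <;> simp_all [BEq.beq, eq_comm])
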